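-- pv_equiv track=rewrite | github.com/AndreeSalazar/PyDead-BIB | Metal_Dead/integrations/metal_dead_benchmark.py | benchmark_gpu_sim
-- ===== SOURCE A (Python) =====
-- def cpu_forward(token_id, vocab, layers):
--     h = token_id * 31 + 7
--     i = 0
--     while i < layers:
--         h = h * 17 + 13
--         h = h % 65536
--         i = i + 1
--     return h % vocab
--
-- def benchmark_gpu_sim(iterations, vocab, layers):
--     total = 0
--     i = 0
--     while i < iterations:
--         r = cpu_forward(i, vocab, layers)
--         total = total + r * 8
--         i = i + 1
--     return total
-- ===== SOURCE B (Python) =====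
-- def benchmark_gpu_sim(iterations, vocab, layers):
--     # Precompute the affine map (a, b) that `layers` hash rounds apply mod 65536,
--     # then evaluate it once per token: O(iterations + layers) instead of O(iterations * layers).
--     a, b = 1, 0
--     n = layers if layers > 0 else 0
--     for _ in range(n):
--         a = (a * 17) % 65536
--         b = (b * 17 + 13) % 65536
--     total = 0
--     for i in range(iterations):
--         h = i * 31 + 7
--         if layers > 0:
--             h = (h * a + b) % 65536
--         total += (h % vocab) * 8
--     return total
-- ===== Notes on version B (the rewrite author's own statement) =====
-- stated objective: faster
-- what changed: B precomputes once the affine coefficients (a,b) equivalent to `layers` hash rounds mod 65536 and applies them per token, removing the per-token inner layer loop: O(iterations + layers) instead of O(iterations * layers).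
-- outside the precondition, e.g. on benchmark_gpu_sim(2, 0, 1): A raises ZeroDivisionError, B raises ZeroDivisionError
import Mathlib
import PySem

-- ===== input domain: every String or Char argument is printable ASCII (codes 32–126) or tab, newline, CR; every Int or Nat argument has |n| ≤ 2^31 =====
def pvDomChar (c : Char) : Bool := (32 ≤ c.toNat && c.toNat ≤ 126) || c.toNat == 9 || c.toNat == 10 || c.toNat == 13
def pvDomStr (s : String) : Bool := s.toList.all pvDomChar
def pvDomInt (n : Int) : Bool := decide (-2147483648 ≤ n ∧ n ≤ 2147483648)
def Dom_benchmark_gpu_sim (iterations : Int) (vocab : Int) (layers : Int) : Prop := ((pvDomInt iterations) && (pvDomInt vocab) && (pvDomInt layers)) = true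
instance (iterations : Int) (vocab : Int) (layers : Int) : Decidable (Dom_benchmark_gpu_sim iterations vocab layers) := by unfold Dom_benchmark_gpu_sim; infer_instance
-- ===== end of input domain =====

-- B removes A's per-token inner layer loop by precomputing once the affine map (a,b)
-- that `layers` hash rounds apply mod 65536 (objective: faster, asymptotic).


-- ===== PORT A =====
-- while i < layers: h = (h*17+13) % 65536   (iterated layers.toNat times)
def cpuForwardLoop (h : Int) : Nat → Int
  | 0 => h
  | k + 1 => cpuForwardLoop (PySem.Int.mod (h * 17 + 13) 65536) k

def cpu_forward (token_id : Int) (vocab : Int) (layers : Int) : Int :=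
  PySem.Int.mod (cpuForwardLoop (token_id * 31 + 7) layers.toNat) vocab

-- while i < iterations: total += cpu_forward(i, vocab, layers) * 8
def benchLoop (vocab layers : Int) (i total : Int) : Nat → Int
  | 0 => total
  | n + 1 => benchLoop vocab layers (i + 1) (total + cpu_forward i vocab layers * 8) n

def benchmark_gpu_sim (iterations : Int) (vocab : Int) (layers : Int) : Int :=
  benchLoop vocab layers 0 0 iterations.toNat

-- ===== PORT B =====
-- for _ in range(n): a = (a*17) % 65536; b = (b*17+13) % 65536
def altABLoop (a b : Int) : Nat → Int × Int
  | 0 => (a, b)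
  | k + 1 => altABLoop (PySem.Int.mod (a * 17) 65536) (PySem.Int.mod (b * 17 + 13) 65536) k

-- for i in range(iterations): h = i*31+7; if layers>0: h = (h*a+b)%65536; total += (h%vocab)*8
def altSumLoop (vocab layers a b : Int) (i total : Int) : Nat → Int
  | 0 => total
  | n + 1 =>
    let h0 : Int := i * 31 + 7
    let h : Int := if layers > 0 then PySem.Int.mod (h0 * a + b) 65536 else h0
    altSumLoop vocab layers a b (i + 1) (total + PySem.Int.mod h vocab * 8) n

def benchmark_gpu_sim_alt (iterations : Int) (vocab : Int) (layers : Int) : Int :=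
  let p := altABLoop 1 0 (if layers > 0 then layers.toNat else 0)
  altSumLoop vocab layers p.1 p.2 0 0 iterations.toNat

-- ===== PRECONDITION & SPEC =====
-- Pre_ excludes exactly the inputs where Python A raises ZeroDivisionError:
-- vocab = 0 with at least one iteration executed.
def Pre_benchmark_gpu_sim (iterations : Int) (vocab : Int) (layers : Int) : Prop :=
  iterations ≤ 0 ∨ vocab ≠ 0
instance (iterations : Int) (vocab : Int) (layers : Int) : Decidable (Pre_benchmark_gpu_sim iterations vocab layers) := by unfold Pre_benchmark_gpu_sim; infer_instance
def pvWitness_benchmark_gpu_sim : Int × Int × Int := (3, 5, 2)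

def Spec_benchmark_gpu_sim (iterations : Int) (vocab : Int) (layers : Int) (out : Int) : Prop := out = benchmark_gpu_sim_alt iterations vocab layers
instance (iterations : Int) (vocab : Int) (layers : Int) (out : Int) : Decidable (Spec_benchmark_gpu_sim iterations vocab layers out) := by unfold Spec_benchmark_gpu_sim; infer_instance

-- ===== CLAIM (what is proved, stated in full; the proofs are below) =====
def Claim_equal_benchmark_gpu_sim : Prop := ∀ (iterations : Int) (vocab : Int) (layers : Int), Dom_benchmark_gpu_sim iterations vocab layers → Pre_benchmark_gpu_sim iterations vocab layers → Spec_benchmark_gpu_sim iterations vocab layers (benchmark_gpu_sim iterations vocab layers)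

-- ===== LEMMAS AND PROOFS =====

-- mod by the positive constant 65536 is Int emod
theorem pvMod65536 (x : Int) : PySem.Int.mod x 65536 = x % 65536 :=
  PySem.Int.mod_eq_emod_of_pos (by norm_num)

-- core invariant: composing the remaining k rounds after one affine step
theorem cpuForwardLoop_affine (k : Nat) : ∀ (a b h : Int),
    cpuForwardLoop ((h * a + b) % 65536) k
      = (h * (altABLoop a b k).1 + (altABLoop a b k).2) % 65536 := by
  induction k with
  | zero => intro a b h; simp [cpuForwardLoop, altABLoop]
  | succ k ih =>
    intro a b h
    have e1 : ∀ x : Int, Int.ModEq 65536 (x % 65536) x :=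
      fun x => Int.emod_emod_of_dvd x dvd_rfl
    have mid : (h * a + b) * 17 + 13 = h * (a * 17) + (b * 17 + 13) := by ring
    have step : ((h * a + b) % 65536 * 17 + 13) % 65536
        = (h * ((a * 17) % 65536) + (b * 17 + 13) % 65536) % 65536 :=
      (((e1 (h * a + b)).mul_right 17).add_right 13).trans
        (mid ▸ (((e1 (a * 17)).mul_left h).add (e1 (b * 17 + 13))).symm)
    show cpuForwardLoop (PySem.Int.mod ((h * a + b) % 65536 * 17 + 13) 65536) k = _
    rw [pvMod65536, step, ih]
    simp [altABLoop]

theorem cpuForwardLoop_eq (j : Nat) (h : Int) :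
    cpuForwardLoop h (j + 1)
      = (h * (altABLoop 1 0 (j + 1)).1 + (altABLoop 1 0 (j + 1)).2) % 65536 := by
  have : cpuForwardLoop h (j + 1)
      = cpuForwardLoop ((h * 17 + 13) % 65536) j := by
    simp [cpuForwardLoop]
  rw [this]
  have : altABLoop 1 0 (j + 1) = altABLoop 17 13 j := by
    simp [altABLoop]
  rw [this, ← cpuForwardLoop_affine j 17 13 h]

-- per-token bodies agree
theorem body_eq (vocab layers i : Int) :
    cpu_forward i vocab layers
      = PySem.Int.mod
          (if layers > 0
            then PySem.Int.mod
              ((i * 31 + 7) * (altABLoop 1 0 (if layers > 0 then layers.toNat else 0)).1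
                + (altABLoop 1 0 (if layers > 0 then layers.toNat else 0)).2) 65536
            else i * 31 + 7) vocab := by
  by_cases hl : layers > 0
  · have hj : ∃ j, layers.toNat = j + 1 := ⟨layers.toNat - 1, by omega⟩
    obtain ⟨j, hje⟩ := hj
    simp only [cpu_forward, hl, if_pos, hje, cpuForwardLoop_eq, pvMod65536]
  · have h0 : layers.toNat = 0 := by omega
    simp [cpu_forward, h0, cpuForwardLoop, hl]

theorem loops_eq (n : Nat) : ∀ (vocab layers i total : Int),
    benchLoop vocab layers i total n
      = altSumLoop vocab layers
          (altABLoop 1 0 (if layers > 0 then layers.toNat else 0)).1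
          (altABLoop 1 0 (if layers > 0 then layers.toNat else 0)).2 i total n := by
  induction n with
  | zero => intro vocab layers i total; rfl
  | succ n ih =>
    intro vocab layers i total
    simp only [benchLoop, altSumLoop, ih, body_eq vocab layers i]

-- ===== VERDICT (by name: the statement is the Claim_ definition above) =====
theorem benchmark_gpu_sim_spec : Claim_equal_benchmark_gpu_sim := by
  intro iterations vocab layers _ _
  unfold Spec_benchmark_gpu_sim benchmark_gpu_sim benchmark_gpu_sim_alt
  exact loops_eq iterations.toNat vocab layers 0 0
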